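-- pv_equiv track=rewrite | github.com/pytchioma/CSV-Graph-Search-App | search.py | build_graph_from_list
-- ===== SOURCE A (Python) =====
-- def build_graph_from_list(foods):
--     graph = {}
--
--     for food in foods:
--         graph[food] = []
--
--         for other in foods:
--             if food != other:
--                 # connect foods with same first word (method)
--                 if food.split()[0] == other.split()[0]:
--                     graph[food].append(other)
--
--     return graph
-- ===== SOURCE B (Python) =====
-- def build_graph_from_list(foods):
--     # Group foods by their first word once (None for whitespace-only strings),
--     # then read each neighbor list off its group: O(n + E) instead of A's O(n^2).
--     groups = {}
--     for food in foods:
--         words = food.split()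
--         key = words[0] if words else None
--         groups.setdefault(key, []).append(food)
--     result = {}
--     for food in foods:
--         words = food.split()
--         key = words[0] if words else None
--         result[food] = [other for other in groups[key] if other != food]
--     return result
-- ===== Notes on version B (the rewrite author's own statement) =====
-- stated objective: faster
-- what changed: Replaced the quadratic all-pairs scan by a single pass that groups foods by first word in a dict, so each neighbor list is read off its group instead of rescanning the whole list.
import Mathlib
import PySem

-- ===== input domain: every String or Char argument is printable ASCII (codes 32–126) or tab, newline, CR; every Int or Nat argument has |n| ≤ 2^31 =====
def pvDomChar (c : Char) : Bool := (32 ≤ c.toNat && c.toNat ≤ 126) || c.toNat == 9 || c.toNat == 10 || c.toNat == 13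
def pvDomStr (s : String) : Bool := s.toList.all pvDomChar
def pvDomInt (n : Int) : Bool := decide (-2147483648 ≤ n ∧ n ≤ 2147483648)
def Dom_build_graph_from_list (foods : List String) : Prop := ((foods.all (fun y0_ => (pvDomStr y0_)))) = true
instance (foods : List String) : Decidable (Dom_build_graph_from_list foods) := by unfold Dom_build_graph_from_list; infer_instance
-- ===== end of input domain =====

-- B groups the foods by first word in one pass (a dict of groups) instead of A's all-pairs scan; same return value.

-- ===== PORT A =====
-- food.split()[0] : none exactly where Python raises IndexError (whitespace-only string)
def firstWord (s : String) : Option String := PySem.List.pyGet? (PySem.Str.split₀ s) 0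

def build_graph_from_list (foods : List String) : List (String × List String) :=
  (foods.foldl (fun graph food =>
      foods.foldl (fun g other =>
          if food != other then
            if firstWord food == firstWord other then
              g.modify food [] (· ++ [other])           -- graph[food].append(other)
            else g
          else g)
        (graph.insert food []))                          -- graph[food] = []
    PySem.Dict.empty).items

-- ===== PORT B =====
-- key = words[0] if words else None  ==  firstWord food (an Option String)
def build_graph_from_list_alt (foods : List String) : List (String × List String) :=
  let groups := foods.foldl
      (fun d food => d.modify (firstWord food) [] (· ++ [food]))  -- groups.setdefault(key, []).append(food)
      PySem.Dict.empty
  (foods.foldl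
      (fun d food =>
        d.insert food ((groups.getD (firstWord food) []).filter (fun other => other != food)))
      PySem.Dict.empty).items

-- ===== PRECONDITION & SPEC =====
-- Pre_ excludes exactly the inputs on which A raises IndexError: a whitespace-only
-- string (one whose split() yields no words) occurring together with some distinct element;
-- B returns a graph there (whitespace-only strings grouped under a None key).
def Pre_build_graph_from_list (foods : List String) : Prop :=
  ∀ f ∈ foods, PySem.Str.split₀ f = [] → ∀ o ∈ foods, o = f
instance (foods : List String) : Decidable (Pre_build_graph_from_list foods) := by
  unfold Pre_build_graph_from_list; infer_instance

def pvWitness_build_graph_from_list : List String :=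
  ["apple pie", "apple juice", "banana split", "apple pie"]

def Spec_build_graph_from_list (foods : List String) (out : List (String × List String)) : Prop := out = build_graph_from_list_alt foods
instance (foods : List String) (out : List (String × List String)) : Decidable (Spec_build_graph_from_list foods out) := by unfold Spec_build_graph_from_list; infer_instance

-- ===== CLAIM (what is proved, stated in full; the proofs are below) =====
def Claim_equal_build_graph_from_list : Prop := ∀ (foods : List String), Dom_build_graph_from_list foods → Pre_build_graph_from_list foods → Spec_build_graph_from_list foods (build_graph_from_list foods)

-- ===== LEMMAS AND PROOFS =====

-- appending into the key just inserted accumulates: A's inner loop is a filter at key k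
theorem foldl_modify_key_filter {α : Type} (l : List α) (c : α → Bool)
    (k : String) (d : PySem.Dict String (List α)) (v : List α) :
    l.foldl (fun g o => if c o then g.modify k [] (· ++ [o]) else g) (d.insert k v)
      = d.insert k (v ++ l.filter c) := by
  induction l generalizing v with
  | nil => simp
  | cons o l ih =>
    by_cases h : c o = true
    · simp only [List.foldl_cons, h, if_pos]
      rw [PySem.Dict.modify, PySem.Dict.getD_insert_self, PySem.Dict.insert_insert_self, ih]
      simp [h]
    · simp only [List.foldl_cons, h, Bool.false_eq_true, if_false, ih,
        List.filter_cons_of_neg (by simpa using h)]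

-- A's outer loop step, in closed form
theorem build_graph_eq_foldl_insert (foods : List String) :
    build_graph_from_list foods
      = (foods.foldl (fun graph food =>
          graph.insert food
            (foods.filter (fun o => (food != o) && (firstWord food == firstWord o))))
        PySem.Dict.empty).items := by
  unfold build_graph_from_list
  congr 2
  funext graph food
  have hstep : (fun (g : PySem.Dict String (List String)) (o : String) =>
      if food != o then
        if firstWord food == firstWord o then g.modify food [] (· ++ [o]) else g
      else g)
      = (fun g o => if (food != o) && (firstWord food == firstWord o)
          then g.modify food [] (· ++ [o]) else g) := by
    funext g o
    by_cases h1 : (food != o) = true <;> simp [h1]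
  rw [hstep, foldl_modify_key_filter]
  simp

-- the grouping dict reads back as a filter
theorem groups_getD (foods : List String) (w : Option String) :
    (foods.foldl (fun d food => d.modify (firstWord food) [] (· ++ [food]))
        (PySem.Dict.empty : PySem.Dict (Option String) (List String))).getD w []
      = foods.filter (fun o => firstWord o == w) := by
  have h := PySem.Dict.getD_foldl_modify_append
      (foods.map (fun f => (firstWord f, f)))
      (PySem.Dict.empty : PySem.Dict (Option String) (List String)) w
  rw [List.foldl_map] at h
  simpa [List.filter_map, Function.comp_def, List.map_id'] using h

-- ===== VERDICT =====
theorem build_graph_from_list_spec : Claim_equal_build_graph_from_list := by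
  intro foods _ _
  unfold Spec_build_graph_from_list build_graph_from_list_alt
  rw [build_graph_eq_foldl_insert]
  congr 2
  funext d food
  rw [groups_getD, List.filter_filter]
  congr 1
  apply List.filter_congr
  intro o _
  rw [bne_comm, @BEq.comm _ _ _ (firstWord o) (firstWord food), Bool.and_comm]
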